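-- pv_equiv track=rewrite | github.com/DevOpsMadDog/Fixops | suite-evidence-risk/risk/runtime/rasp.py | _detect_path_traversal
-- ===== SOURCE A (Python) =====
-- from typing import Dict, List, Optional
--
-- def _detect_path_traversal(
--     request_path: str, request_body: Optional[str]
-- ) -> bool:
--     """Proprietary path traversal detection."""
--     path_patterns = [
--         "../",
--         "..\\",
--         "/etc/passwd",
--         "/etc/shadow",
--         "/proc/",
--         "..%2F",
--         "..%5C",
--     ]
--
--     text_to_check = f"{request_path} {request_body or ''}"
--
--     return any(pattern in text_to_check for pattern in path_patterns)
-- ===== SOURCE B (Python) =====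
-- def _detect_path_traversal(request_path, request_body):
--     """One left-to-right scan: at each position test whether any pattern starts there."""
--     patterns = ("../", "..\\", "/etc/passwd", "/etc/shadow", "/proc/", "..%2F", "..%5C")
--     text = f"{request_path} {request_body or ''}"
--     for i in range(len(text)):
--         for p in patterns:
--             if text.startswith(p, i):
--                 return True
--     return False
-- ===== Notes on version B (the rewrite author's own statement) =====
-- stated objective: alternative
-- what changed: Replaces seven independent 'pattern in text' substring scans with a single left-to-right pass over the text that tests at each position whether any pattern starts there.
import Mathlib
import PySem

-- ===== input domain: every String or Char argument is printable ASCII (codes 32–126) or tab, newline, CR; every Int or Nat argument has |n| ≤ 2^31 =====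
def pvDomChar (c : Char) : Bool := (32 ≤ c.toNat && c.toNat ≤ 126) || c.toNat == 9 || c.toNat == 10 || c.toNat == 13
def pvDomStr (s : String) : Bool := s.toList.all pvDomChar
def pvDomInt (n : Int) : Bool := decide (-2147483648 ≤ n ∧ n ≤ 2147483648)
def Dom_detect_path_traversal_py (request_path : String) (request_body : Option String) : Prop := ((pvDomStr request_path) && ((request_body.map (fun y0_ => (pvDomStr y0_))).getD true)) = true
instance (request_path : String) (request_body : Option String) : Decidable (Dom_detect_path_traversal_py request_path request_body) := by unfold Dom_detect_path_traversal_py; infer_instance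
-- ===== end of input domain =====

-- ===== PORT A =====
-- Port of A: concatenate path, ' ', body-or-'' and test each pattern with 'in'.
def pvPatterns : List (List Char) :=
  ["../".toList, "..\\".toList, "/etc/passwd".toList, "/etc/shadow".toList,
   "/proc/".toList, "..%2F".toList, "..%5C".toList]

def detect_path_traversal_py (request_path : String) (request_body : Option String) : Bool :=
  let text := request_path ++ " " ++ (request_body.getD "")
  pvPatterns.any (fun p => PySem.Chars.isIn p text.toList)

-- ===== PORT B =====
-- Port of B: one scan over the text; at each position test whether some pattern starts there.
def pvScan (pats : List (List Char)) : List Char → Bool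
  | [] => false
  | c :: rest =>
      if pats.any (fun p => List.isPrefixOf p (c :: rest)) then true
      else pvScan pats rest

def detect_path_traversal_py_alt (request_path : String) (request_body : Option String) : Bool :=
  let text := request_path ++ " " ++ (request_body.getD "")
  pvScan pvPatterns text.toList

-- ===== PRECONDITION & SPEC =====
def Spec_detect_path_traversal_py (request_path : String) (request_body : Option String) (out : Bool) : Prop := out = detect_path_traversal_py_alt request_path request_body
instance (request_path : String) (request_body : Option String) (out : Bool) : Decidable (Spec_detect_path_traversal_py request_path request_body out) := by unfold Spec_detect_path_traversal_py; infer_instance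

-- ===== CLAIM (what is proved, stated in full; the proofs are below) =====
def Claim_equal_detect_path_traversal_py : Prop := ∀ (request_path : String) (request_body : Option String), Dom_detect_path_traversal_py request_path request_body → Spec_detect_path_traversal_py request_path request_body (detect_path_traversal_py request_path request_body)

-- ===== LEMMAS AND PROOFS =====

-- The scan finds a pattern iff some pattern is an infix, provided no pattern is empty.
theorem pvScan_eq_any_isIn (pats : List (List Char)) (hne : ∀ p ∈ pats, p ≠ []) :
    ∀ s : List Char, pvScan pats s = pats.any (fun p => PySem.Chars.isIn p s) := by
  intro s
  induction s with
  | nil =>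
      simp only [pvScan]
      symm
      simp only [List.any_eq_false]
      intro p hp
      rw [Bool.not_eq_true, PySem.Chars.isIn_eq_false_iff]
      intro hinf
      exact hne p hp (List.eq_nil_of_infix_nil hinf)
  | cons c rest ih =>
      show (if pats.any (fun p => List.isPrefixOf p (c :: rest)) then true else pvScan pats rest)
            = pats.any (fun p => PySem.Chars.isIn p (c :: rest))
      by_cases h : pats.any (fun p => List.isPrefixOf p (c :: rest)) = true
      · rw [if_pos h]
        symm
        rw [List.any_eq_true] at h ⊢
        obtain ⟨p, hp, hpre⟩ := h
        exact ⟨p, hp, by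
          rw [PySem.Chars.isIn_iff_infix]
          exact (List.isPrefixOf_iff_prefix.mp hpre).isInfix⟩
      · rw [if_neg h, ih]
        rw [Bool.not_eq_true, List.any_eq_false] at h
        apply Bool.eq_iff_iff.mpr
        simp only [List.any_eq_true]
        constructor
        · rintro ⟨p, hp, hin⟩
          refine ⟨p, hp, ?_⟩
          rw [PySem.Chars.isIn_iff_infix] at hin ⊢
          exact hin.trans (List.suffix_cons c rest).isInfix
        · rintro ⟨p, hp, hin⟩
          refine ⟨p, hp, ?_⟩
          rw [PySem.Chars.isIn_iff_infix] at hin ⊢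
          rcases (List.infix_cons_iff).mp hin with hpre | hinf
          · exact absurd (List.isPrefixOf_iff_prefix.mpr hpre) (by simpa using h p hp)
          · exact hinf

-- ===== VERDICT (by name: the statement is the Claim_ definition above) =====
theorem detect_path_traversal_py_spec : Claim_equal_detect_path_traversal_py := by
  intro request_path request_body _
  unfold Spec_detect_path_traversal_py detect_path_traversal_py detect_path_traversal_py_alt
  rw [pvScan_eq_any_isIn]
  intro p hp
  fin_cases hp <;> decide
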